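-- pv_equiv track=rewrite | github.com/Jsik94/PythonStudy | src/codingTestWithPython/Crain.py | myPop
-- ===== SOURCE A (Python) =====
-- def myPop(arr):
--     data=0
--     for i in range(len(arr),0,-1):
--         if arr[i-1] == 0:
--             continue
--         else :
--             data = arr[i-1]
--             arr[i-1]=0
--             break;
--     return data
-- ===== SOURCE B (Python) =====
-- def myPop(arr):
--     nz = [i for i, x in enumerate(arr) if x != 0]
--     if not nz:
--         return 0
--     j = nz[-1]
--     data = arr[j]
--     arr[j] = 0
--     return data
-- ===== Notes on version B (the rewrite author's own statement) =====
-- stated objective: alternative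
-- what changed: B first materialises the list of all non-zero positions with a comprehension and then pops the element at that list's last entry, instead of A's backward scan that breaks at the first non-zero element.
import Mathlib
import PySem

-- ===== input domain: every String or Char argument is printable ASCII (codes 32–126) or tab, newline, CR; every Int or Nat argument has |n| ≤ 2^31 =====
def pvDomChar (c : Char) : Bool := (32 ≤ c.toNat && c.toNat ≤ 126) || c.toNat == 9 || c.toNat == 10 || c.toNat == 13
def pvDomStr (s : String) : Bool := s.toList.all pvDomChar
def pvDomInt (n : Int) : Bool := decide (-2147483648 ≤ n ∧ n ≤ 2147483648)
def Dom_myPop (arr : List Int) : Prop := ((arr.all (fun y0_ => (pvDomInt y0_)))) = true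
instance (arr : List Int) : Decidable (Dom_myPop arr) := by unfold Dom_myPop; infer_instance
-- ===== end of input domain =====

-- B builds the list of non-zero positions and pops at its last entry, instead of A's
-- backward break-on-first-hit scan; the equivalence proved is about the RETURN value only
-- (both Pythons also zero the same element in place, which is not modelled here).

-- ===== PORT A =====
-- A's loop 'for i in range(len(arr),0,-1): if arr[i-1]==0: continue else: …; break'
-- ported as descending recursion on i; arr[i-1] is always in range here.
def myPopGoA (arr : List Int) : Nat → Int
  | 0 => 0
  | n + 1 => if arr.getD n 0 == 0 then myPopGoA arr n else arr.getD n 0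

def myPop (arr : List Int) : Int := myPopGoA arr arr.length

-- ===== PORT B =====
-- B's comprehension '[i for i, x in enumerate(arr) if x != 0]' as a filter over the
-- index range, then nz[-1] as getLast?.
def myPopNz (arr : List Int) : List Nat :=
  (List.range arr.length).filter (fun i => arr.getD i 0 != 0)

def myPop_alt (arr : List Int) : Int :=
  match (myPopNz arr).getLast? with
  | none => 0
  | some j => arr.getD j 0

-- ===== PRECONDITION & SPEC =====
def Spec_myPop (arr : List Int) (out : Int) : Prop := out = myPop_alt arr
instance (arr : List Int) (out : Int) : Decidable (Spec_myPop arr out) := by unfold Spec_myPop; infer_instance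

-- ===== CLAIM (what is proved, stated in full; the proofs are below) =====
def Claim_equal_myPop : Prop := ∀ (arr : List Int), Dom_myPop arr → Spec_myPop arr (myPop arr)

-- ===== LEMMAS AND PROOFS =====

def myPopNzN (arr : List Int) (n : Nat) : List Nat :=
  (List.range n).filter (fun i => arr.getD i 0 != 0)

theorem myPopNzN_succ (arr : List Int) (n : Nat) :
    myPopNzN arr (n + 1) =
      if arr.getD n 0 != 0 then myPopNzN arr n ++ [n] else myPopNzN arr n := by
  unfold myPopNzN
  rw [List.range_succ, List.filter_append]
  cases hb : arr.getD n 0 != 0 <;> simp only [List.filter] <;> rw [hb] <;> simp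

theorem myPop_key (arr : List Int) (n : Nat) :
    myPopGoA arr n =
      (match (myPopNzN arr n).getLast? with
       | none => 0
       | some j => arr.getD j 0) := by
  induction n with
  | zero => simp [myPopGoA, myPopNzN]
  | succ n ih =>
    rw [myPopNzN_succ]
    simp only [myPopGoA]
    cases hb : arr.getD n 0 == 0
    · have hb' : (arr.getD n 0 != 0) = true := by simp only [bne]; rw [hb]; rfl
      simp only [hb, hb', if_true, if_false, Bool.false_eq_true]
      simp [List.getLast?_append]
    · have hb' : (arr.getD n 0 != 0) = false := by simp only [bne]; rw [hb]; rfl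
      simp only [hb, hb', if_true, if_false, Bool.false_eq_true]
      simpa using ih

-- ===== VERDICT (by name: the statement is the Claim_ definition above) =====
theorem myPop_spec : Claim_equal_myPop := by
  intro arr _
  show myPopGoA arr arr.length = myPop_alt arr
  rw [myPop_key arr arr.length]
  rfl
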